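-- pv_equiv track=rewrite | github.com/jhy549/credible_LLM_watermarking | steg/test_ecc.py | encode_decimal
-- ===== SOURCE A (Python) =====
-- def decimal_to_binary(n, bits):
--     return bin(n)[2:].zfill(bits)
--
-- def hamming_encode(data):
--     d = [int(bit) for bit in data]
--     p1 = d[0] ^ d[1] ^ d[3]
--     p2 = d[0] ^ d[2] ^ d[3]
--     p3 = d[1] ^ d[2] ^ d[3]
--     return f"{p1}{p2}{d[0]}{p3}{d[1]}{d[2]}{d[3]}"
--
-- def encode_decimal(decimal):
--     binary_str = decimal_to_binary(decimal, 7)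
--     encoded_str = ""
--     for i in range(0, len(binary_str), 4):
--         nibble = binary_str[i:i+4]
--         if len(nibble) < 4:
--             nibble = nibble.ljust(4, '0')
--         encoded_str += hamming_encode(nibble)
--     return encoded_str
-- ===== SOURCE B (Python) =====
-- # Precomputed Hamming(7,4) codeword table, indexed by base-16 digits extracted
-- # arithmetically with divmod; output assembled back-to-front.
-- _CW = ["0000000", "1101001", "0101010", "1000011",
--        "1001100", "0100101", "1100110", "0001111",
--        "1110000", "0011001", "1011010", "0110011",
--        "0111100", "1010101", "0010110", "1111111"]
--
--
-- def encode_decimal(decimal):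
--     width = max(7, decimal.bit_length())
--     ndig = -(-width // 4)          # nibbles needed (ceiling division)
--     m = decimal << (4 * ndig - width)  # right-pad with zero bits to a whole number of nibbles
--     out = ""
--     for _ in range(ndig):
--         m, r = divmod(m, 16)
--         out = _CW[r] + out
--     return out
-- ===== Notes on version B (the rewrite author's own statement) =====
-- stated objective: alternative
-- what changed: B never builds or slices a binary string and computes no parities: it right-pads the number itself with zero bits by a shift, extracts base-16 digits with divmod, and assembles the output back-to-front from a precomputed 16-entry codeword table.
import Mathlib
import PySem

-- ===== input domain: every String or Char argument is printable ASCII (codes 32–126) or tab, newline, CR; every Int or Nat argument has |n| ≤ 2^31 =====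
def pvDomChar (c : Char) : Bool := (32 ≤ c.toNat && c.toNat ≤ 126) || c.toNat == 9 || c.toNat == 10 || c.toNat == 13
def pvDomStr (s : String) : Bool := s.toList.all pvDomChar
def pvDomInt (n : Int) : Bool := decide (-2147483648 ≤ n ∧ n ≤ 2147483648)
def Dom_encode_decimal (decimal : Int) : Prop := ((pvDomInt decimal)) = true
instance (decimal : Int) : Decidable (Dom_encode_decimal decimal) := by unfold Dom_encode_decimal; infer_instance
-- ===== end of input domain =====

-- B drops the binary string, the nibble slicing and the parity XORs: it pads the NUMBER with a
-- shift, extracts base-16 digits with divmod, and assembles the output back-to-front from a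
-- precomputed 16-entry codeword table (objective: alternative; same asymptotic cost).

-- ===== PORT A =====
-- bin(n)[2:].zfill(bits): bin(n) is PySem.Int.toBinChars0b, [2:] a slice, zfill hand-ported
-- (pad on the left with '0' to the target width; exact here since no sign reaches zfill under Pre_)
def decimal_to_binary (n : Int) (bits : Int) : List Char :=
  let s := PySem.List.slice (PySem.Int.toBinChars0b n) (some 2) none
  List.replicate (bits.toNat - s.length) '0' ++ s

-- d = [int(bit) for bit in data]: int(c) via PySem.Int.ofChars?; none (ValueError) is
-- unreachable under Pre_ (all chars are '0'/'1'), .getD 0 totalises. d[0]…d[3] via pyGetD: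
-- always in range (every nibble has length 4). The f-string is str() of each int, concatenated.
def hamming_encode (data : List Char) : List Char :=
  let d := data.map (fun bit => (PySem.Int.ofChars? [bit]).getD 0)
  let d0 := PySem.List.pyGetD d 0 0
  let d1 := PySem.List.pyGetD d 1 0
  let d2 := PySem.List.pyGetD d 2 0
  let d3 := PySem.List.pyGetD d 3 0
  let p1 := PySem.Int.bxor (PySem.Int.bxor d0 d1) d3
  let p2 := PySem.Int.bxor (PySem.Int.bxor d0 d2) d3
  let p3 := PySem.Int.bxor (PySem.Int.bxor d1 d2) d3
  PySem.Int.toChars p1 ++ PySem.Int.toChars p2 ++ PySem.Int.toChars d0 ++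
    PySem.Int.toChars p3 ++ PySem.Int.toChars d1 ++ PySem.Int.toChars d2 ++ PySem.Int.toChars d3

def encode_decimal (decimal : Int) : String :=
  let binary_str := decimal_to_binary decimal 7
  let encoded_str := (PySem.List.pyRange 0 (PySem.List.len binary_str) 4).foldl
    (fun acc i =>
      let nibble := PySem.List.slice binary_str (some i) (some (i + 4))
      -- nibble.ljust(4, '0') when len(nibble) < 4
      let nibble := if nibble.length < 4 then nibble ++ List.replicate (4 - nibble.length) '0' else nibble
      acc ++ hamming_encode nibble) []
  String.mk encoded_str

-- ===== PORT B =====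
-- the module-level table _CW (strings as char lists)
def pv_CW : List (List Char) :=
  [['0','0','0','0','0','0','0'], ['1','1','0','1','0','0','1'],
   ['0','1','0','1','0','1','0'], ['1','0','0','0','0','1','1'],
   ['1','0','0','1','1','0','0'], ['0','1','0','0','1','0','1'],
   ['1','1','0','0','1','1','0'], ['0','0','0','1','1','1','1'],
   ['1','1','1','0','0','0','0'], ['0','0','1','1','0','0','1'],
   ['1','0','1','1','0','1','0'], ['0','1','1','0','0','1','1'],
   ['0','1','1','1','1','0','0'], ['1','0','1','0','1','0','1'],
   ['0','0','1','0','1','1','0'], ['1','1','1','1','1','1','1']]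

-- for _ in range(ndig): m, r = divmod(m, 16); out = _CW[r] + out
-- divmod? is some since 16 ≠ 0; _CW[r] via pyGetD (r = m % 16 is always in 0..15)
def pv_loop : Nat → Int → List Char → List Char
  | 0, _, out => out
  | k + 1, m, out =>
      let mr := (PySem.Int.divmod? m 16).getD (0, 0)
      pv_loop k mr.1 (PySem.List.pyGetD pv_CW mr.2 [] ++ out)

def encode_decimal_alt (decimal : Int) : String :=
  let width : Int := max 7 (PySem.Int.bitLength decimal)
  let ndig : Int := -(PySem.Int.floordiv (-width) 4)
  let m : Int := decimal <<< (4 * ndig - width).toNat  -- shift is ≥ 0 here; Python n << k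
  String.mk (pv_loop ndig.toNat m [])

-- ===== PRECONDITION & SPEC =====
-- A raises ValueError on every negative input (bin(-n)[2:] leaves a 'b' that int() rejects)
def Pre_encode_decimal (decimal : Int) : Prop := 0 ≤ decimal
instance (decimal : Int) : Decidable (Pre_encode_decimal decimal) := by unfold Pre_encode_decimal; infer_instance
def pvWitness_encode_decimal : Int := (5)

def Spec_encode_decimal (decimal : Int) (out : String) : Prop := out = encode_decimal_alt decimal
instance (decimal : Int) (out : String) : Decidable (Spec_encode_decimal decimal out) := by unfold Spec_encode_decimal; infer_instance

-- ===== CLAIM (what is proved, stated in full; the proofs are below) =====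
def Claim_equal_encode_decimal : Prop := ∀ (decimal : Int), Dom_encode_decimal decimal → Pre_encode_decimal decimal → Spec_encode_decimal decimal (encode_decimal decimal)

-- ===== LEMMAS AND PROOFS =====

-- proof-side normal form: the big-endian binary expansion of m, left-padded with zeros to width L
def padBin : Nat → Nat → List Char
  | 0, _ => []
  | (L + 1), m => padBin L (m / 2) ++ [Nat.digitChar (m % 2)]

-- proof-side: process a char list 4 at a time with A's per-nibble encoder
def hamChunks : List Char → List Char
  | c0 :: c1 :: c2 :: c3 :: rest => hamming_encode [c0, c1, c2, c3] ++ hamChunks rest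
  | _ => []

theorem padBin_zero (L : Nat) : padBin L 0 = List.replicate L '0' := by
  induction L with
  | zero => rfl
  | succ L ih => rw [padBin]; simp [ih, List.replicate_succ']; rfl

theorem length_padBin (L m : Nat) : (padBin L m).length = L := by
  induction L generalizing m with
  | zero => rfl
  | succ L ih => rw [padBin]; simp [ih]

theorem padBin_toDigits (L m : Nat) (hL : 0 < L) (hm : m < 2 ^ L) :
    padBin L m = List.replicate (L - (Nat.toDigits 2 m).length) '0' ++ Nat.toDigits 2 m := by
  induction L generalizing m with
  | zero => omega
  | succ L ih =>
      by_cases h2 : m < 2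
      · have hd : m / 2 = 0 := by omega
        have hmod : m % 2 = m := by omega
        rw [padBin, hd, padBin_zero, hmod, Nat.toDigits_of_lt_base h2]
        simp
      · have hLpos : 0 < L := by
          by_contra h
          have : L = 0 := by omega
          subst this
          simp at hm; omega
        have hdiv : m / 2 < 2 ^ L := by
          rw [Nat.div_lt_iff_lt_mul (by norm_num)]
          rw [← pow_succ]; exact hm
        have hIH := ih (m / 2) hLpos hdiv
        rw [padBin, hIH, Nat.toDigits_eq_if (b := 2) (n := m) (by norm_num), if_neg h2]
        have hlen : (Nat.toDigits 2 (m / 2) ++ [(m % 2).digitChar]).length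
            = (Nat.toDigits 2 (m / 2)).length + 1 := by simp
        rw [hlen]
        have hcnt : L + 1 - ((Nat.toDigits 2 (m / 2)).length + 1)
            = L - (Nat.toDigits 2 (m / 2)).length := by omega
        rw [hcnt, List.append_assoc]

theorem toDigits_len_eq_bitLength (m : Nat) (hm : 0 < m) :
    (Nat.toDigits 2 m).length = PySem.Int.bitLength (m : Int) := by
  induction m using Nat.strong_induction_on with
  | _ m ih =>
      rw [PySem.Int.bitLength_natCast hm, Nat.toDigits_eq_if (by norm_num)]
      by_cases h2 : m < 2
      · have : m = 1 := by omega
        subst this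
        simp [PySem.Int.bitLength_zero]
      · rw [if_neg h2]
        have := ih (m / 2) (by omega) (by omega)
        simp [this]

theorem padBin_shift (L k m : Nat) :
    padBin (L + k) (m * 2 ^ k) = padBin L m ++ List.replicate k '0' := by
  induction k with
  | zero => simp
  | succ k ih =>
      have h1 : m * 2 ^ (k + 1) / 2 = m * 2 ^ k := by
        rw [pow_succ, ← mul_assoc, Nat.mul_div_cancel _ (by norm_num)]
      have h2 : m * 2 ^ (k + 1) % 2 = 0 := by
        rw [pow_succ, ← mul_assoc, Nat.mul_mod_left]
      rw [show L + (k + 1) = (L + k) + 1 from rfl, padBin, h1, h2, ih,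
        List.replicate_succ' (n := k)]
      simp [Nat.digitChar]

theorem padBin_split (a b m : Nat) :
    padBin (a + b) m = padBin a (m >>> b) ++ padBin b (m % 2 ^ b) := by
  induction b generalizing m with
  | zero => simp [padBin]
  | succ b ih =>
      have h1 : m % 2 ^ (b + 1) / 2 = m / 2 % 2 ^ b := by
        rw [pow_succ, mul_comm]; exact Nat.mod_mul_right_div_self m 2 (2 ^ b)
      have h2 : m % 2 ^ (b + 1) % 2 = m % 2 := Nat.mod_mod_of_dvd m (dvd_pow_self 2 (Nat.succ_ne_zero b))
      rw [show a + (b + 1) = (a + b) + 1 from rfl, padBin, ih (m / 2), padBin, h1, h2,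
        Nat.shiftRight_succ_inside]
      simp

-- hamChunks distributes over ++ when the prefix has length a multiple of 4
theorem hamChunks_append (xs ys : List Char) (h : xs.length % 4 = 0) :
    hamChunks (xs ++ ys) = hamChunks xs ++ hamChunks ys := by
  induction hn : xs.length using Nat.strong_induction_on generalizing xs with
  | _ n ih =>
  subst hn
  rcases xs with _ | ⟨a, xs⟩
  · simp [hamChunks]
  rcases xs with _ | ⟨b, xs⟩; · simp at h
  rcases xs with _ | ⟨c, xs⟩; · simp at h
  rcases xs with _ | ⟨d, xs⟩; · simp at h
  have hx : xs.length % 4 = 0 := by simp at h; omega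
  show hamChunks (a :: b :: c :: d :: (xs ++ ys)) = hamChunks (a :: b :: c :: d :: xs) ++ _
  rw [hamChunks, hamChunks, List.append_assoc]
  rw [ih xs.length (by simp; omega) xs hx rfl]

theorem padBin_four (t : Nat) : padBin 4 t =
    [Nat.digitChar (t / 2 / 2 / 2 % 2), Nat.digitChar (t / 2 / 2 % 2),
     Nat.digitChar (t / 2 % 2), Nat.digitChar (t % 2)] := rfl

-- the table is correct: entry t is A's codeword for the 4-bit pattern of t
theorem CW_eq_ham : ∀ t : Nat, t < 16 → pv_CW.getD t [] = hamming_encode (padBin 4 t) := by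
  decide

theorem hamChunks_four (a b c d : Char) :
    hamChunks [a, b, c, d] = hamming_encode [a, b, c, d] := by
  simp [hamChunks]

-- the divmod loop on a natural produces exactly the chunked Hamming encoding of its binary digits
theorem loopB (q : Nat) : ∀ (M : Nat) (out : List Char),
    pv_loop q ((M : Int)) out = hamChunks (padBin (4 * q) M) ++ out := by
  induction q with
  | zero => intro M out; simp [pv_loop, hamChunks, padBin]
  | succ q ih =>
      intro M out
      have hdm : (PySem.Int.divmod? ((M : Int)) 16).getD (0, 0)
          = (((M / 16 : Nat) : Int), ((M % 16 : Nat) : Int)) := by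
        have h1 : PySem.Int.divmod? ((M : Int)) 16
            = some (PySem.Int.floordiv ((M : Int)) 16, PySem.Int.mod ((M : Int)) 16) := by
          simp [PySem.Int.divmod?, PySem.Int.floordiv, PySem.Int.mod]
        have h2 : PySem.Int.floordiv ((M : Int)) 16 = ((M / 16 : Nat) : Int) := by
          exact_mod_cast PySem.Int.floordiv_natCast M 16
        have h3 : PySem.Int.mod ((M : Int)) 16 = ((M % 16 : Nat) : Int) := by
          exact_mod_cast PySem.Int.mod_natCast M 16
        rw [h1, Option.getD_some, h2, h3]
      rw [pv_loop, hdm]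
      have hget : PySem.List.pyGetD pv_CW (((M % 16 : Nat) : Int)) []
          = pv_CW.getD (M % 16) [] := PySem.List.pyGetD_natCast pv_CW (M % 16) []
      rw [hget, CW_eq_ham (M % 16) (Nat.mod_lt _ (by norm_num)), ih (M / 16)]
      have hsplit : padBin (4 * (q + 1)) M = padBin (4 * q) (M / 16) ++ padBin 4 (M % 16) := by
        have h := padBin_split (4 * q) 4 M
        rw [show 4 * q + 4 = 4 * (q + 1) by ring, Nat.shiftRight_eq_div_pow] at h
        norm_num at h
        exact h
      rw [hsplit, hamChunks_append _ _ (by rw [length_padBin]; omega), List.append_assoc,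
        padBin_four, hamChunks_four]

-- ===== A-side normal form (from the loop over the zfill'd string) =====

theorem pyRange4_nil (b : Int) (h : b ≤ 0) : PySem.List.pyRange 0 b 4 = [] := by
  rw [PySem.List.pyRange_of_pos 0 b (by norm_num), if_neg (by omega)]
  rfl

theorem pyRange4_cons (b : Int) (h : 0 < b) :
    PySem.List.pyRange 0 b 4 = 0 :: (PySem.List.pyRange 0 (b - 4) 4).map (· + 4) := by
  rw [PySem.List.pyRange_of_pos 0 b (by norm_num), PySem.List.pyRange_of_pos 0 (b - 4) (by norm_num),
    if_pos (by omega)]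
  by_cases h4 : 0 < b - 4
  · rw [if_pos h4]
    have hn : ((b - 0 + 4 - 1) / 4).toNat = ((b - 4 - 0 + 4 - 1) / 4).toNat + 1 := by omega
    rw [hn, List.range_succ_eq_map, List.map_cons, List.map_map, List.map_map]
    refine congrArg₂ _ (by norm_num) (List.map_congr_left fun k _ => ?_)
    simp [Nat.succ_eq_add_one]
    ring
  · rw [if_neg h4]
    have hn : ((b - 0 + 4 - 1) / 4).toNat = 1 := by omega
    rw [hn]
    simp

theorem slice_shift (ds : List Char) (i : Int) (hi : 0 ≤ i) :
    PySem.List.slice ds (some (i + 4)) (some (i + 4 + 4)) =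
      PySem.List.slice (ds.drop 4) (some i) (some (i + 4)) := by
  rw [PySem.List.slice_toNat ds (by omega) (by omega), PySem.List.slice_toNat _ hi (by omega),
    List.drop_drop]
  have h1 : (i + 4 + 4).toNat - (i + 4).toNat = 4 := by omega
  have h2 : (i + 4).toNat - i.toNat = 4 := by omega
  have h3 : (i + 4).toNat = 4 + i.toNat := by omega
  rw [h1, h2, h3, Nat.add_comm 4 i.toNat]

def bodyA (ds : List Char) (i : Int) : List Char :=
  if (PySem.List.slice ds (some i) (some (i + 4))).length < 4
  then PySem.List.slice ds (some i) (some (i + 4)) ++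
    List.replicate (4 - (PySem.List.slice ds (some i) (some (i + 4))).length) '0'
  else PySem.List.slice ds (some i) (some (i + 4))

theorem bodyA_shift (ds : List Char) (i : Int) (hi : 0 ≤ i) :
    bodyA ds (i + 4) = bodyA (ds.drop 4) i := by
  unfold bodyA
  rw [slice_shift ds i hi]

theorem slice04 (ds : List Char) : PySem.List.slice ds (some 0) (some (0 + 4)) = ds.take 4 := by
  rw [PySem.List.slice_zero_start, show (0 : Int) + 4 = ((4 : Nat) : Int) by norm_num,
    PySem.List.slice_to_natCast]

theorem loopA (ds : List Char) :
    ((PySem.List.pyRange 0 (ds.length : Int) 4).flatMap (fun i => hamming_encode (bodyA ds i)))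
    = hamChunks (ds ++ List.replicate ((4 - ds.length % 4) % 4) '0') := by
  induction hn : ds.length using Nat.strong_induction_on generalizing ds with
  | _ n ih =>
  subst hn
  rcases hds : ds with _ | ⟨a, tl⟩
  · rw [List.length_nil, Nat.cast_zero, pyRange4_nil 0 (le_refl 0)]
    simp [hamChunks]
  · subst hds
    have hpos : (0 : Int) < ((a :: tl).length : Int) := by exact_mod_cast Nat.succ_pos tl.length
    rw [pyRange4_cons _ hpos, List.flatMap_cons, List.flatMap_map]
    have hmem : ∀ i ∈ PySem.List.pyRange 0 (((a :: tl).length : Int) - 4) 4,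
        (fun i => hamming_encode (bodyA (a :: tl) (i + 4))) i
          = (fun i => hamming_encode (bodyA ((a :: tl).drop 4) i)) i := by
      intro i hi
      have h0i : 0 ≤ i := ((PySem.List.mem_pyRange_iff_of_pos (by norm_num) i).mp hi).1
      simp only [bodyA_shift (a :: tl) i h0i]
    rw [List.flatMap_congr hmem]
    have htail : PySem.List.pyRange 0 (((a :: tl).length : Int) - 4) 4
        = PySem.List.pyRange 0 ((((a :: tl).drop 4).length : Int)) 4 := by
      by_cases h4 : 4 ≤ (a :: tl).length
      · have : (((a :: tl).drop 4).length : Int) = ((a :: tl).length : Int) - 4 := by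
          rw [List.length_drop]; omega
        rw [this]
      · rw [pyRange4_nil _ (by omega),
          pyRange4_nil _ (by rw [List.length_drop]; omega)]
    rw [htail, ih ((a :: tl).drop 4).length (by simp only [List.length_drop, List.length_cons]; omega) _ rfl]
    -- first chunk and reassembly
    by_cases h4 : 4 ≤ (a :: tl).length
    · rcases tl with _ | ⟨b, tl⟩; · exact absurd h4 (by simp)
      rcases tl with _ | ⟨c, tl⟩; · exact absurd h4 (by simp)
      rcases tl with _ | ⟨d, tl'⟩; · exact absurd h4 (by simp)
      have hb : bodyA (a :: b :: c :: d :: tl') 0 = [a, b, c, d] := by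
        unfold bodyA
        rw [slice04]
        simp
      rw [hb]
      have hpad : ((4 - ((a :: b :: c :: d :: tl').drop 4).length % 4) % 4)
          = ((4 - (a :: b :: c :: d :: tl').length % 4) % 4) := by
        simp
        omega
      rw [hpad]
      show hamming_encode [a, b, c, d] ++ hamChunks (tl' ++ _) = _
      rw [List.cons_append, List.cons_append, List.cons_append, List.cons_append, hamChunks]
    · have hlt : (a :: tl).length < 4 := by omega
      have hb : bodyA (a :: tl) 0
          = (a :: tl) ++ List.replicate (4 - (a :: tl).length) '0' := by
        unfold bodyA
        rw [slice04, List.take_of_length_le (by omega)]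
        rw [if_pos (by omega)]
      rw [hb]
      have hdrop : (a :: tl).drop 4 = [] := List.drop_eq_nil_of_le (by omega)
      rw [hdrop]
      have hpad : (4 - (a :: tl).length % 4) % 4 = 4 - (a :: tl).length := by omega
      rw [hpad]
      rcases tl with _ | ⟨b, tl⟩
      · simp [hamChunks, List.replicate]
      rcases tl with _ | ⟨c, tl⟩
      · simp [hamChunks, List.replicate]
      rcases tl with _ | ⟨d, tl'⟩
      · simp [hamChunks]
      · exact absurd hlt (by simp)

theorem bstr (m : Nat) :
    decimal_to_binary (m : Int) 7 = padBin (max 7 (PySem.Int.bitLength (m : Int))) m := by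
  simp only [decimal_to_binary]
  rw [show PySem.Int.toBinChars0b (m : Int) = '0' :: 'b' :: Nat.toDigits 2 m by
    unfold PySem.Int.toBinChars0b
    rw [if_neg (by omega)]
    simp]
  rw [PySem.List.slice_from _ (by norm_num)]
  rw [show ((2 : Int).toNat) = 2 from rfl]
  rw [List.drop_succ_cons, List.drop_succ_cons, List.drop_zero]
  have hlen : 0 < m → (Nat.toDigits 2 m).length = PySem.Int.bitLength (m : Int) :=
    fun h => toDigits_len_eq_bitLength m h
  have hmlt : m < 2 ^ max 7 (PySem.Int.bitLength (m : Int)) := by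
    have h1 := PySem.Int.lt_two_pow_bitLength (m : Int)
    simp only [Int.natAbs_natCast] at h1
    exact lt_of_lt_of_le h1 (Nat.pow_le_pow_right (by norm_num) (le_max_right _ _))
  rw [padBin_toDigits _ m (by omega) hmlt]
  have hcnt : max 7 (PySem.Int.bitLength (m : Int)) - (Nat.toDigits 2 m).length
      = (7 : Int).toNat - (Nat.toDigits 2 m).length := by
    rcases Nat.eq_zero_or_pos m with hm | hm
    · subst hm
      rw [Nat.toDigits_zero]
      simp [PySem.Int.bitLength_zero]
    · rw [hlen hm]
      have := @Nat.length_toDigits_pos 2 m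
      omega
  rw [hcnt]

theorem A_normal (m : Nat) :
    encode_decimal (m : Int) =
      String.mk (hamChunks (padBin (max 7 (PySem.Int.bitLength (m : Int))) m ++
        List.replicate ((4 - (max 7 (PySem.Int.bitLength (m : Int))) % 4) % 4) '0')) := by
  show String.mk ((PySem.List.pyRange 0 (PySem.List.len (decimal_to_binary (m : Int) 7)) 4).foldl
      (fun acc i => acc ++ hamming_encode (bodyA (decimal_to_binary (m : Int) 7) i)) []) = _
  rw [PySem.List.foldl_append_eq_flatMap, List.nil_append, bstr m, PySem.List.len_eq,
    loopA, length_padBin]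

-- ===== VERDICT (by name: the statement is the Claim_ definition above) =====
theorem encode_decimal_spec : Claim_equal_encode_decimal := by
  intro decimal _ hpre
  obtain ⟨m, rfl⟩ := Int.eq_ofNat_of_zero_le hpre
  unfold Spec_encode_decimal
  rw [A_normal m]
  simp only [encode_decimal_alt]
  set L := max 7 (PySem.Int.bitLength (m : Int)) with hLdef
  set p := (4 - L % 4) % 4 with hpdef
  have hL7 : 7 ≤ L := le_max_left _ _
  -- ndig = -((-L) // 4) = (L + p) / 4
  have hndig : -(PySem.Int.floordiv (-(max (7 : Int) (PySem.Int.bitLength (m : Int)))) 4)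
      = (((L + p) / 4 : Nat) : Int) := by
    have hLcast : max (7 : Int) (PySem.Int.bitLength (m : Int)) = ((L : Nat) : Int) := by
      rw [hLdef]
      push_cast
      omega
    rw [hLcast, (PySem.Int.neg_floordiv_neg_eq_iff_of_pos (by norm_num)).mpr]
    push_cast
    constructor <;> omega
  rw [hndig]
  have hshift : (4 * (((L + p) / 4 : Nat) : Int) - max (7 : Int) (PySem.Int.bitLength (m : Int))).toNat = p := by
    have hLcast : max (7 : Int) (PySem.Int.bitLength (m : Int)) = ((L : Nat) : Int) := by
      rw [hLdef]; push_cast; omega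
    rw [hLcast]
    omega
  rw [hshift]
  have hm2 : (m : Int) <<< p = ((m * 2 ^ p : Nat) : Int) := by
    rw [show ((m : Int) <<< p) = ((m <<< p : Nat) : Int) from rfl, Nat.shiftLeft_eq]
  rw [hm2, loopB, List.append_nil, Int.toNat_natCast]
  have hq : 4 * ((L + p) / 4) = L + p := by omega
  rw [hq, ← padBin_shift L p m]
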